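-- pv_equiv track=rewrite | github.com/MindFigment/nand2tetris | projects/10/JackAnalyzer/jack_tokenizer.py | _assemble_splited_parts
-- ===== SOURCE A (Python) =====
-- def _assemble_splited_parts(splited, splited_by):
--     tokenized_mass = []
--     for i, token in enumerate(splited):
--         if i == 0:
--             tokenized_mass.append(token)
--         else:
--             tokenized_mass.append(splited_by)
--             tokenized_mass.append(token)
--     return tokenized_mass
-- ===== SOURCE B (Python) =====
-- def _assemble_splited_parts(splited, splited_by):
--     n = len(splited)
--     return [splited[i // 2] if i % 2 == 0 else splited_by
--             for i in range(max(2 * n - 1, 0))]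
-- ===== Notes on version B (the rewrite author's own statement) =====
-- stated objective: alternative
-- what changed: Replaces A's append loop with a branch on i==0 by a positional closed-form construction: the output has length max(2n-1,0) and element i is splited[i//2] when i is even and the separator when i is odd, built as one comprehension over range.
import Mathlib
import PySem

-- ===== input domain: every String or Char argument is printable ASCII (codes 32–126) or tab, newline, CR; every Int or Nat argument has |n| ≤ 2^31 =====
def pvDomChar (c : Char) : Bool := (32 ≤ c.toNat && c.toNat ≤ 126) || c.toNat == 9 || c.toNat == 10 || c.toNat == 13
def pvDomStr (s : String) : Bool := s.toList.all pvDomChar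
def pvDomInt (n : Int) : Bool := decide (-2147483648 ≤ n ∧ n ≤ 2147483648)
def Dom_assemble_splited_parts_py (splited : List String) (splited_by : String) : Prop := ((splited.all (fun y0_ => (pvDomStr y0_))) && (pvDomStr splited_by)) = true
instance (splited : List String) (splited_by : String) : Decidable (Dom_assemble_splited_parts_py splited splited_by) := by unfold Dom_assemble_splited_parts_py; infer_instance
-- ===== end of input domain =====

-- ===== PORT A =====
-- B builds the output positionally by a closed-form index rule instead of A's append loop with an i==0 branch.
def assemble_splited_parts_py (splited : List String) (splited_by : String) : List String :=
  (PySem.List.enumerate splited 0).foldl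
    (fun tokenized_mass p =>
      if p.1 == 0 then tokenized_mass ++ [p.2]
      else tokenized_mass ++ [splited_by, p.2]) []

-- ===== PORT B =====
-- the index i // 2 is always in range (i < 2n-1 ⇒ i//2 < n), so pyGetD with default "" is exact here
def assemble_splited_parts_py_alt (splited : List String) (splited_by : String) : List String :=
  (PySem.List.pyRange 0 (max (2 * (splited.length : Int) - 1) 0) 1).map
    (fun i => if PySem.Int.mod i 2 == 0
              then PySem.List.pyGetD splited (PySem.Int.floordiv i 2) ""
              else splited_by)

-- ===== PRECONDITION & SPEC =====
def Spec_assemble_splited_parts_py (splited : List String) (splited_by : String) (out : List String) : Prop := out = assemble_splited_parts_py_alt splited splited_by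
instance (splited : List String) (splited_by : String) (out : List String) : Decidable (Spec_assemble_splited_parts_py splited splited_by out) := by unfold Spec_assemble_splited_parts_py; infer_instance

-- ===== CLAIM (what is proved, stated in full; the proofs are below) =====
def Claim_equal_assemble_splited_parts_py : Prop := ∀ (splited : List String) (splited_by : String), Dom_assemble_splited_parts_py splited splited_by → Spec_assemble_splited_parts_py splited splited_by (assemble_splited_parts_py splited splited_by)

-- ===== LEMMAS AND PROOFS =====

-- canonical interleaving both ports are reduced to
def interC (sep : String) : List String → List String
  | [] => []
  | h :: t => h :: t.flatMap (fun x => [sep, x])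

theorem foldA_eq (sep : String) : ∀ (xs : List String) (s : Nat) (acc : List String),
    (PySem.List.enumerate xs ((s : Int) + 1)).foldl
      (fun tokenized_mass p =>
        if p.1 == 0 then tokenized_mass ++ [p.2]
        else tokenized_mass ++ [sep, p.2]) acc
      = acc ++ xs.flatMap (fun t => [sep, t]) := by
  intro xs
  induction xs with
  | nil => simp [PySem.List.enumerate_nil]
  | cons h t ih =>
    intro s acc
    rw [PySem.List.enumerate_cons]
    have h0 : (((s : Int) + 1) == 0) = false := by simp; omega
    simp only [List.foldl_cons, h0, Bool.false_eq_true, if_false]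
    have := ih (s + 1) (acc ++ [sep, h])
    push_cast at this
    rw [this]
    simp

theorem A_eq_interC (xs : List String) (sep : String) :
    assemble_splited_parts_py xs sep = interC sep xs := by
  unfold assemble_splited_parts_py
  cases xs with
  | nil => simp [PySem.List.enumerate_nil, interC]
  | cons h t =>
    rw [PySem.List.enumerate_cons]
    simp only [List.foldl_cons, show ((0 : Int) == 0) = true from rfl, if_true]
    have := foldA_eq sep t 0 [h]
    push_cast at this
    simpa [interC] using this

theorem interC_concat (sep : String) (ys : List String) (x : String) (h : ys ≠ []) :
    interC sep (ys ++ [x]) = interC sep ys ++ [sep, x] := by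
  obtain ⟨a, t, rfl⟩ := List.exists_cons_of_ne_nil h
  simp [interC, List.flatMap_append]

theorem B_eq_interC (xs : List String) (sep : String) :
    assemble_splited_parts_py_alt xs sep = interC sep xs := by
  unfold assemble_splited_parts_py_alt
  induction xs using List.reverseRecOn with
  | nil => simp [interC, PySem.List.pyRange_one_eq_nil]
  | append_singleton ys x ih =>
    rcases eq_or_ne ys [] with rfl | hys
    · simp only [List.nil_append, List.length_cons, List.length_nil]
      rw [show (max (2 * ((1 : Nat) : Int) - 1) 0) = 0 + 1 by norm_num,
        PySem.List.pyRange_one_singleton]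
      simp [interC, PySem.Int.mod, PySem.Int.floordiv, PySem.List.pyGetD_zero_cons]
    · set m : Int := (ys.length : Int) with hm
      have hm1 : 1 ≤ m := by
        have := List.length_pos_iff.mpr hys
        omega
      have hlen : ((ys ++ [x]).length : Int) = m + 1 := by simp [hm]
      rw [hlen]
      have hmax1 : max (2 * (m + 1) - 1) 0 = 2 * m + 1 := by omega
      have hmax2 : max (2 * m - 1) 0 = 2 * m - 1 := by omega
      rw [hmax1,
        PySem.List.pyRange_one_append 0 (2 * m - 1) (2 * m + 1) (by omega) (by omega),
        List.map_append]
      have hseg : PySem.List.pyRange (2 * m - 1) (2 * m + 1) 1 = [2 * m - 1, 2 * m] := by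
        rw [PySem.List.pyRange_one_cons (by omega),
          show (2 * m - 1 + 1) = 2 * m by ring,
          PySem.List.pyRange_one_cons (by omega),
          PySem.List.pyRange_one_eq_nil (by omega)]
      -- the first segment maps exactly as it does for ys alone
      have hcongr : ∀ i ∈ PySem.List.pyRange 0 (2 * m - 1) 1,
          (if PySem.Int.mod i 2 == 0
           then PySem.List.pyGetD (ys ++ [x]) (PySem.Int.floordiv i 2) ""
           else sep)
          = (if PySem.Int.mod i 2 == 0
             then PySem.List.pyGetD ys (PySem.Int.floordiv i 2) ""
             else sep) := by
        intro i hi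
        rw [PySem.List.mem_pyRange_one] at hi
        by_cases hpar : PySem.Int.mod i 2 == 0
        · simp only [hpar, if_true]
          have hq0 : 0 ≤ PySem.Int.floordiv i 2 := by
            rw [PySem.Int.floordiv_eq_ediv_of_pos (by omega)]; omega
          have hqm : PySem.Int.floordiv i 2 < m := by
            rw [PySem.Int.floordiv_eq_ediv_of_pos (by omega)]; omega
          rw [PySem.List.pyGetD_eq_getElem (ys ++ [x]) "" hq0
              (by rw [hlen]; omega),
            PySem.List.pyGetD_eq_getElem ys "" hq0 (by rw [← hm]; exact hqm)]
          exact List.getElem_append_left (by omega)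
        · rw [if_neg (by simpa using hpar), if_neg (by simpa using hpar)]
      rw [hmax2] at ih
      rw [List.map_congr_left hcongr, hseg, interC_concat sep ys x hys, ← ih]
      congr 1
      -- the two fresh cells: separator then x
      have hodd : (PySem.Int.mod (2 * m - 1) 2 == 0) = false := by
        rw [PySem.Int.mod_eq_emod_of_pos (by omega)]
        simp
      have heven : (PySem.Int.mod (2 * m) 2 == 0) = true := by
        rw [PySem.Int.mod_eq_emod_of_pos (by omega)]
        simp
      have hdiv : PySem.Int.floordiv (2 * m) 2 = m := by
        rw [PySem.Int.floordiv_eq_ediv_of_pos (by omega)]; omega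
      simp only [List.map_cons, List.map_nil, hodd, heven, if_true, if_false,
        Bool.false_eq_true, hdiv]
      rw [hm, PySem.List.pyGetD_natCast]
      simp [List.getD]

-- ===== VERDICT (by name: the statement is the Claim_ definition above) =====
theorem assemble_splited_parts_py_spec : Claim_equal_assemble_splited_parts_py := by
  intro splited splited_by _
  unfold Spec_assemble_splited_parts_py
  rw [A_eq_interC, B_eq_interC]
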